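-- pv_equiv track=rewrite | github.com/posl/comment_recommendation | script/split_gen/5_time/en/234_C/3.py | solve
-- ===== SOURCE A (Python) =====
-- def solve(K):
--     ans = 0
--     for i in range(100):
--         ans += 2 * (K % 2) * 10 ** i
--         K //= 2
--         if K == 0:
--             break
--     return ans
-- ===== SOURCE B (Python) =====
-- def solve(K):
--     def f(m):
--         return 0 if m == 0 else m % 2 + 10 * f(m // 2)
--     return 2 * f(K)
-- ===== Notes on version B (the rewrite author's own statement) =====
-- stated objective: simpler
-- what changed: Replaced A's fixed-count indexed loop (in-place halving, break, power-of-ten accumulation) by a pure back-to-front recursion (low bit plus ten times the recursion on the half) doubled once at the end; Pre_ excludes negative K, where A's capped-loop two's-complement result is an accident and B's recursion does not terminate (RecursionError).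
import Mathlib
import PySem

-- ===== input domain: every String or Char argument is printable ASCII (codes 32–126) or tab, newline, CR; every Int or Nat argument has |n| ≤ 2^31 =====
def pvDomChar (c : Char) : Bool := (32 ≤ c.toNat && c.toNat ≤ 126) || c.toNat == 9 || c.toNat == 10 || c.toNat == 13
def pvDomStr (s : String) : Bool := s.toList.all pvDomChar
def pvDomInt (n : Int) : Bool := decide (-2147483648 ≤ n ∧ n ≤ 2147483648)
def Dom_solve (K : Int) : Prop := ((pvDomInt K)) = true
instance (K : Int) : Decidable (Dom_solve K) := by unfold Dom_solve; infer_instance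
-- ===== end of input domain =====

-- B replaces A's fixed-count indexed loop (in-place K mutation, break, 10**i power
-- accumulation) by a pure back-to-front recursion on the binary digits (objective: simpler).

-- ===== PORT A =====
-- the 'for i in range(100)' loop with early break: fuel = remaining iterations, i = loop index
def solveGo : Nat → Nat → Int → Int → Int
  | 0, _, _, ans => ans
  | f+1, i, K, ans =>
    let ans' := ans + 2 * PySem.Int.mod K 2 * 10 ^ i
    let K' := PySem.Int.floordiv K 2
    if K' = 0 then ans' else solveGo f (i+1) K' ans'

def solve (K : Int) : Int := solveGo 100 0 K 0

-- ===== PORT B =====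
-- f(m) = 0 if m == 0 else m % 2 + 10 * f(m // 2); within Pre_ (K ≥ 0) m is always ≥ 0,
-- so the helper is ported on Nat, where Python's % and // on nonnegative ints are Nat.mod/Nat.div exactly
def solveAltF : Nat → Int
  | 0 => 0
  | m+1 => (((m+1) % 2 : Nat) : Int) + 10 * solveAltF ((m+1) / 2)
decreasing_by exact Nat.div_lt_self (Nat.succ_pos m) (by omega)

def solve_alt (K : Int) : Int := 2 * solveAltF K.toNat

-- ===== PRECONDITION & SPEC =====
-- Pre_ excludes negative K, where A's value (the full capped loop over the two's-complement
-- low bits of K) is an accident of the capped loop and B's recursion does not terminate.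
def Pre_solve (K : Int) : Prop := 0 ≤ K
instance (K : Int) : Decidable (Pre_solve K) := by unfold Pre_solve; infer_instance
def pvWitness_solve : Int := 5

def Spec_solve (K : Int) (out : Int) : Prop := out = solve_alt K
instance (K : Int) (out : Int) : Decidable (Spec_solve K out) := by unfold Spec_solve; infer_instance

-- ===== CLAIM (what is proved, stated in full; the proofs are below) =====
def Claim_equal_solve : Prop := ∀ (K : Int), Dom_solve K → Pre_solve K → Spec_solve K (solve K)

-- ===== LEMMAS AND PROOFS =====

lemma solveAltF_eq (m : Nat) :
    solveAltF m = if m = 0 then 0 else ((m % 2 : Nat) : Int) + 10 * solveAltF (m / 2) := by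
  cases m with
  | zero => simp [solveAltF]
  | succ n => simp [solveAltF]

-- the loop on a nonnegative K that fits in f bits computes the digits of K itself
lemma solveGo_nonneg (f : Nat) :
    ∀ (K ans : Int) (i : Nat), 0 ≤ K → K < 2 ^ f →
      solveGo f i K ans = ans + 2 * 10 ^ i * solveAltF K.toNat := by
  induction f with
  | zero =>
    intro K ans i h0 h1
    have h1' : K < 1 := by simpa using h1
    have : K = 0 := by omega
    subst this
    simp [solveGo, solveAltF]
  | succ f ih =>
    intro K ans i h0 h1
    have hm : PySem.Int.mod K 2 = K % 2 := PySem.Int.mod_eq_emod_of_pos (by norm_num)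
    have hd : PySem.Int.floordiv K 2 = K / 2 := PySem.Int.floordiv_eq_ediv_of_pos (by norm_num)
    have hfe : solveAltF K.toNat
        = ((K.toNat % 2 : Nat) : Int) + 10 * solveAltF (K.toNat / 2) ∨ K = 0 := by
      rcases eq_or_ne K 0 with h | h
      · exact Or.inr h
      · left
        rw [solveAltF_eq]
        have : K.toNat ≠ 0 := by omega
        simp [this]
    simp only [solveGo, hm, hd]
    by_cases hK : K / 2 = 0
    · -- break: K = 0 or K = 1
      simp only [hK, if_true]
      have : K = 0 ∨ K = 1 := by omega
      rcases this with h | h <;> subst h <;> simp [solveAltF]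
    · simp only [hK, if_false]
      have h2 : (0 : Int) ≤ K / 2 := by omega
      have h3 : K / 2 < 2 ^ f := by
        have : (2 : Int) ^ (f + 1) = 2 * 2 ^ f := by ring
        omega
      rw [ih (K / 2) _ (i + 1) h2 h3]
      rcases hfe with hfe | h0'
      · rw [hfe]
        have e1 : (K / 2).toNat = K.toNat / 2 := by omega
        have e2 : ((K.toNat % 2 : Nat) : Int) = K % 2 := by omega
        rw [e1, e2]
        ring
      · exact absurd (by omega : K / 2 = 0) hK

-- ===== VERDICT (by name: the statement is the Claim_ definition above) =====
theorem solve_spec : Claim_equal_solve := by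
  intro K hdom hpre
  have hD : -2147483648 ≤ K ∧ K ≤ 2147483648 := by
    simpa [Dom_solve, pvDomInt] using hdom
  have h0 : (0 : Int) ≤ K := hpre
  have hlt : K < 2 ^ 100 := by
    have : (2 : Int) ^ 100 = 1267650600228229401496703205376 := by norm_num
    omega
  unfold Spec_solve solve solve_alt
  rw [solveGo_nonneg 100 K 0 0 h0 hlt]
  ring
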